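-- pv_equiv track=rewrite | github.com/PaulHarder2/HarderWare | WxServices/src/WxVis/synoptic_map.py | _parse_sky_oktas
-- ===== SOURCE A (Python) =====
-- _COVERAGE_OKTAS: dict[str, int] = {
--     "SKC": 0, "CLR": 0, "NCD": 0, "NSC": 0,
--     "FEW": 1, "SCT": 3, "BKN": 6, "OVC": 8, "VV": 8,
-- }
--
-- _COVERAGE_ORDER = ["OVC", "VV", "BKN", "SCT", "FEW", "SKC", "CLR", "NCD", "NSC"]
--
-- def _parse_sky_oktas(raw_sky: str | None) -> int:
--     """Return the WMO okta value (0–8) for the most significant sky layer."""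
--     if not isinstance(raw_sky, str) or not raw_sky:
--         return 0
--     tokens = raw_sky.upper().split()
--     for cover_token in _COVERAGE_ORDER:
--         for token in tokens:
--             if token.startswith(cover_token):
--                 return _COVERAGE_OKTAS[cover_token]
--     return 0
-- ===== SOURCE B (Python) =====
-- _COVERAGE_OKTAS: dict[str, int] = {
--     "SKC": 0, "CLR": 0, "NCD": 0, "NSC": 0,
--     "FEW": 1, "SCT": 3, "BKN": 6, "OVC": 8, "VV": 8,
-- }
--
--
-- def _parse_sky_oktas(raw_sky):
--     """Return the WMO okta value (0-8) for the most significant sky layer.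
--
--     Single pass over the tokens keeping a running maximum okta (no coverage
--     prefix is a prefix of another, and priority order is okta-descending, so
--     the max equals the first match by priority)."""
--     if not isinstance(raw_sky, str) or not raw_sky:
--         return 0
--     best = 0
--     for token in raw_sky.upper().split():
--         okta = next((v for k, v in _COVERAGE_OKTAS.items() if token.startswith(k)), 0)
--         if okta > best:
--             best = okta
--     return best
-- ===== Notes on version B (the rewrite author's own statement) =====
-- stated objective: simpler
-- what changed: A scans all tokens once per coverage code in priority order and early-returns at the first match; B makes a single pass over the tokens, computing each token's okta and keeping a running maximum (valid because no coverage prefix is a prefix of another and priority order is okta-descending).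
import Mathlib
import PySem

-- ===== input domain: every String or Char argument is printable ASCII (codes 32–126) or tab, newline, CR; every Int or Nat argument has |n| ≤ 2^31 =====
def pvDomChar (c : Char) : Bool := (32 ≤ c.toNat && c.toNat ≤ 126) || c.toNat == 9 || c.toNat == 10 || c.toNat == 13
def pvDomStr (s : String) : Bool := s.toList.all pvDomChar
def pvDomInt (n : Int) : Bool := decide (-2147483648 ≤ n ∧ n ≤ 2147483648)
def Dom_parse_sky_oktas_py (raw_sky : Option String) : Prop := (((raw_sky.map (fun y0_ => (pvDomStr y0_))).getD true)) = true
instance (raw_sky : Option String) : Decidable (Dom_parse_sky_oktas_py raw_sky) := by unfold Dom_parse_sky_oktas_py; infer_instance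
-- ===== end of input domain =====

-- B replaces A's priority-major double scan with one token-major pass keeping a running maximum okta (objective: simpler).

-- ===== PORT A =====
def pvCoverageOktas : List (String × Int) :=
  [("SKC",0),("CLR",0),("NCD",0),("NSC",0),("FEW",1),("SCT",3),("BKN",6),("OVC",8),("VV",8)]

def pvCoverageOrder : List String := ["OVC","VV","BKN","SCT","FEW","SKC","CLR","NCD","NSC"]

-- _COVERAGE_OKTAS[cover_token]: first-match association lookup (every key looked up is a
-- literal key of the dict, so the KeyError branch is unreachable; 0 is a dead default).
def pvOktaOf (c : String) : Int :=
  ((pvCoverageOktas.find? (fun kv => kv.1 == c)).map (·.2)).getD 0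

-- inner `for token in tokens: if token.startswith(cover_token): return _COVERAGE_OKTAS[cover_token]`
def pvFindTokenA (cover : String) : List String → Option Int
  | [] => none
  | t :: ts => if PySem.Str.startswith t cover then some (pvOktaOf cover) else pvFindTokenA cover ts

-- outer `for cover_token in _COVERAGE_ORDER: …`; falls through to `return 0`
def pvOuterA (tokens : List String) : List String → Int
  | [] => 0
  | c :: cs =>
    match pvFindTokenA c tokens with
    | some v => v
    | none => pvOuterA tokens cs

def parse_sky_oktas_py (raw_sky : Option String) : Int :=
  match raw_sky with
  | none => 0
  | some s =>
    if s = "" then 0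
    else pvOuterA (PySem.Str.split₀ (PySem.Str.upper s)) pvCoverageOrder

-- ===== PORT B =====
-- `next((v for k, v in _COVERAGE_OKTAS.items() if token.startswith(k)), 0)`
def pvTokenOkta (t : String) : Int :=
  match pvCoverageOktas.find? (fun kv => PySem.Str.startswith t kv.1) with
  | some kv => kv.2
  | none => 0

def parse_sky_oktas_py_alt (raw_sky : Option String) : Int :=
  match raw_sky with
  | none => 0
  | some s =>
    if s = "" then 0
    else (PySem.Str.split₀ (PySem.Str.upper s)).foldl
      (fun best t =>
        let okta := pvTokenOkta t
        if okta > best then okta else best) 0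

-- ===== PRECONDITION & SPEC =====
def Spec_parse_sky_oktas_py (raw_sky : Option String) (out : Int) : Prop := out = parse_sky_oktas_py_alt raw_sky
instance (raw_sky : Option String) (out : Int) : Decidable (Spec_parse_sky_oktas_py raw_sky out) := by unfold Spec_parse_sky_oktas_py; infer_instance

-- ===== CLAIM (what is proved, stated in full; the proofs are below) =====
def Claim_equal_parse_sky_oktas_py : Prop := ∀ (raw_sky : Option String), Dom_parse_sky_oktas_py raw_sky → Spec_parse_sky_oktas_py raw_sky (parse_sky_oktas_py raw_sky)

-- ===== LEMMAS AND PROOFS =====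

-- Two distinct coverage prefixes can never both be prefixes of one token.
theorem pv_sw_disj (t p q : String) (h1 : ¬ p.toList <+: q.toList) (h2 : ¬ q.toList <+: p.toList)
    (hp : PySem.Str.startswith t p = true) (hq : PySem.Str.startswith t q = true) : False := by
  rw [PySem.Str.startswith_eq, PySem.Chars.startswith_iff] at hp hq
  rcases List.prefix_or_prefix_of_prefix hp hq with h | h
  · exact h1 h
  · exact h2 h

-- the priority chain value, as a function of the five `startswith` booleans with nonzero okta
def pvChain (e8a e8b e6 e3 e1 : Bool) : Int :=
  if e8a then 8 else if e8b then 8 else if e6 then 6 else if e3 then 3 else if e1 then 1 else 0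

theorem pvChain_nonneg (a b c d e : Bool) : 0 ≤ pvChain a b c d e := by
  unfold pvChain; split_ifs <;> omega

-- B's per-token okta (first match in dict order) equals the priority chain of its startswith tests
theorem pvTokenOkta_eq (t : String) :
    pvTokenOkta t = pvChain (PySem.Str.startswith t "OVC") (PySem.Str.startswith t "VV")
      (PySem.Str.startswith t "BKN") (PySem.Str.startswith t "SCT") (PySem.Str.startswith t "FEW") := by
  unfold pvTokenOkta
  rcases h : pvCoverageOktas.find? (fun kv => PySem.Str.startswith t kv.1) with _ | kv
  · rw [h]
    have h0 := List.find?_eq_none.mp h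
    have h1 := h0 ("FEW",1) (by simp [pvCoverageOktas])
    have h2 := h0 ("SCT",3) (by simp [pvCoverageOktas])
    have h3 := h0 ("BKN",6) (by simp [pvCoverageOktas])
    have h4 := h0 ("OVC",8) (by simp [pvCoverageOktas])
    have h5 := h0 ("VV",8) (by simp [pvCoverageOktas])
    simp only [Bool.not_eq_true] at h1 h2 h3 h4 h5
    unfold pvChain
    rw [h1, h2, h3, h4, h5]
    simp
  · rw [h]
    have hm := List.mem_of_find?_eq_some h
    have hp := List.find?_some h
    simp only [pvCoverageOktas, List.mem_cons, List.not_mem_nil, or_false] at hm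
    rcases hm with rfl | rfl | rfl | rfl | rfl | rfl | rfl | rfl | rfl <;> simp only at hp
    · -- SKC
      have f1 : PySem.Str.startswith t "OVC" = false :=
        Bool.eq_false_iff.mpr (fun h' => pv_sw_disj t "SKC" "OVC" (by decide) (by decide) hp h')
      have f2 : PySem.Str.startswith t "VV" = false :=
        Bool.eq_false_iff.mpr (fun h' => pv_sw_disj t "SKC" "VV" (by decide) (by decide) hp h')
      have f3 : PySem.Str.startswith t "BKN" = false :=
        Bool.eq_false_iff.mpr (fun h' => pv_sw_disj t "SKC" "BKN" (by decide) (by decide) hp h')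
      have f4 : PySem.Str.startswith t "SCT" = false :=
        Bool.eq_false_iff.mpr (fun h' => pv_sw_disj t "SKC" "SCT" (by decide) (by decide) hp h')
      have f5 : PySem.Str.startswith t "FEW" = false :=
        Bool.eq_false_iff.mpr (fun h' => pv_sw_disj t "SKC" "FEW" (by decide) (by decide) hp h')
      unfold pvChain
      rw [f1, f2, f3, f4, f5]
      simp
    · -- CLR
      have f1 : PySem.Str.startswith t "OVC" = false :=
        Bool.eq_false_iff.mpr (fun h' => pv_sw_disj t "CLR" "OVC" (by decide) (by decide) hp h')
      have f2 : PySem.Str.startswith t "VV" = false :=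
        Bool.eq_false_iff.mpr (fun h' => pv_sw_disj t "CLR" "VV" (by decide) (by decide) hp h')
      have f3 : PySem.Str.startswith t "BKN" = false :=
        Bool.eq_false_iff.mpr (fun h' => pv_sw_disj t "CLR" "BKN" (by decide) (by decide) hp h')
      have f4 : PySem.Str.startswith t "SCT" = false :=
        Bool.eq_false_iff.mpr (fun h' => pv_sw_disj t "CLR" "SCT" (by decide) (by decide) hp h')
      have f5 : PySem.Str.startswith t "FEW" = false :=
        Bool.eq_false_iff.mpr (fun h' => pv_sw_disj t "CLR" "FEW" (by decide) (by decide) hp h')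
      unfold pvChain
      rw [f1, f2, f3, f4, f5]
      simp
    · -- NCD
      have f1 : PySem.Str.startswith t "OVC" = false :=
        Bool.eq_false_iff.mpr (fun h' => pv_sw_disj t "NCD" "OVC" (by decide) (by decide) hp h')
      have f2 : PySem.Str.startswith t "VV" = false :=
        Bool.eq_false_iff.mpr (fun h' => pv_sw_disj t "NCD" "VV" (by decide) (by decide) hp h')
      have f3 : PySem.Str.startswith t "BKN" = false :=
        Bool.eq_false_iff.mpr (fun h' => pv_sw_disj t "NCD" "BKN" (by decide) (by decide) hp h')
      have f4 : PySem.Str.startswith t "SCT" = false :=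
        Bool.eq_false_iff.mpr (fun h' => pv_sw_disj t "NCD" "SCT" (by decide) (by decide) hp h')
      have f5 : PySem.Str.startswith t "FEW" = false :=
        Bool.eq_false_iff.mpr (fun h' => pv_sw_disj t "NCD" "FEW" (by decide) (by decide) hp h')
      unfold pvChain
      rw [f1, f2, f3, f4, f5]
      simp
    · -- NSC
      have f1 : PySem.Str.startswith t "OVC" = false :=
        Bool.eq_false_iff.mpr (fun h' => pv_sw_disj t "NSC" "OVC" (by decide) (by decide) hp h')
      have f2 : PySem.Str.startswith t "VV" = false :=
        Bool.eq_false_iff.mpr (fun h' => pv_sw_disj t "NSC" "VV" (by decide) (by decide) hp h')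
      have f3 : PySem.Str.startswith t "BKN" = false :=
        Bool.eq_false_iff.mpr (fun h' => pv_sw_disj t "NSC" "BKN" (by decide) (by decide) hp h')
      have f4 : PySem.Str.startswith t "SCT" = false :=
        Bool.eq_false_iff.mpr (fun h' => pv_sw_disj t "NSC" "SCT" (by decide) (by decide) hp h')
      have f5 : PySem.Str.startswith t "FEW" = false :=
        Bool.eq_false_iff.mpr (fun h' => pv_sw_disj t "NSC" "FEW" (by decide) (by decide) hp h')
      unfold pvChain
      rw [f1, f2, f3, f4, f5]
      simp
    · -- FEW
      have f1 : PySem.Str.startswith t "OVC" = false :=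
        Bool.eq_false_iff.mpr (fun h' => pv_sw_disj t "FEW" "OVC" (by decide) (by decide) hp h')
      have f2 : PySem.Str.startswith t "VV" = false :=
        Bool.eq_false_iff.mpr (fun h' => pv_sw_disj t "FEW" "VV" (by decide) (by decide) hp h')
      have f3 : PySem.Str.startswith t "BKN" = false :=
        Bool.eq_false_iff.mpr (fun h' => pv_sw_disj t "FEW" "BKN" (by decide) (by decide) hp h')
      have f4 : PySem.Str.startswith t "SCT" = false :=
        Bool.eq_false_iff.mpr (fun h' => pv_sw_disj t "FEW" "SCT" (by decide) (by decide) hp h')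
      unfold pvChain
      rw [f1, f2, f3, f4, hp]
      simp
    · -- SCT
      have f1 : PySem.Str.startswith t "OVC" = false :=
        Bool.eq_false_iff.mpr (fun h' => pv_sw_disj t "SCT" "OVC" (by decide) (by decide) hp h')
      have f2 : PySem.Str.startswith t "VV" = false :=
        Bool.eq_false_iff.mpr (fun h' => pv_sw_disj t "SCT" "VV" (by decide) (by decide) hp h')
      have f3 : PySem.Str.startswith t "BKN" = false :=
        Bool.eq_false_iff.mpr (fun h' => pv_sw_disj t "SCT" "BKN" (by decide) (by decide) hp h')
      unfold pvChain
      rw [f1, f2, f3, hp]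
      simp
    · -- BKN
      have f1 : PySem.Str.startswith t "OVC" = false :=
        Bool.eq_false_iff.mpr (fun h' => pv_sw_disj t "BKN" "OVC" (by decide) (by decide) hp h')
      have f2 : PySem.Str.startswith t "VV" = false :=
        Bool.eq_false_iff.mpr (fun h' => pv_sw_disj t "BKN" "VV" (by decide) (by decide) hp h')
      unfold pvChain
      rw [f1, f2, hp]
      simp
    · -- OVC
      unfold pvChain
      rw [hp]
      simp
    · -- VV
      have f1 : PySem.Str.startswith t "OVC" = false :=
        Bool.eq_false_iff.mpr (fun h' => pv_sw_disj t "VV" "OVC" (by decide) (by decide) hp h')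
      unfold pvChain
      rw [f1, hp]
      simp

-- combining chains pointwise by `or` is taking the max of the two chain values
theorem pvChain_or (a1 a2 a3 a4 a5 b1 b2 b3 b4 b5 : Bool) :
    pvChain (a1 || b1) (a2 || b2) (a3 || b3) (a4 || b4) (a5 || b5)
      = max (pvChain a1 a2 a3 a4 a5) (pvChain b1 b2 b3 b4 b5) := by
  revert a1 a2 a3 a4 a5 b1 b2 b3 b4 b5; decide

-- The inner loop of A returns `some (okta of cover)` iff some token starts with cover.
theorem pvFindTokenA_eq (cover : String) (ts : List String) :
    pvFindTokenA cover ts =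
      if ts.any (fun t => PySem.Str.startswith t cover) then some (pvOktaOf cover) else none := by
  induction ts with
  | nil => simp [pvFindTokenA]
  | cons t ts ih =>
    simp only [pvFindTokenA, List.any_cons, ih]
    by_cases h : PySem.Str.startswith t cover = true
    · simp only [h, Bool.true_or]
      simp
    · simp only [Bool.not_eq_true] at h
      simp only [h, Bool.false_or]
      simp

-- one step of A's outer loop
theorem pvOuterA_cons (ts : List String) (c : String) (cs : List String) :
    pvOuterA ts (c :: cs) =
      if ts.any (fun t => PySem.Str.startswith t c) then pvOktaOf c else pvOuterA ts cs := by
  rw [pvOuterA, pvFindTokenA_eq]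
  split_ifs <;> rfl

-- A's outer loop over the literal priority list is the chain of the five `any` tests
theorem pvOuterA_chain (ts : List String) :
    pvOuterA ts pvCoverageOrder =
      pvChain (ts.any (fun u => PySem.Str.startswith u "OVC"))
              (ts.any (fun u => PySem.Str.startswith u "VV"))
              (ts.any (fun u => PySem.Str.startswith u "BKN"))
              (ts.any (fun u => PySem.Str.startswith u "SCT"))
              (ts.any (fun u => PySem.Str.startswith u "FEW")) := by
  have h8a : pvOktaOf "OVC" = 8 := by decide
  have h8b : pvOktaOf "VV" = 8 := by decide
  have h6 : pvOktaOf "BKN" = 6 := by decide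
  have h3 : pvOktaOf "SCT" = 3 := by decide
  have h1 : pvOktaOf "FEW" = 1 := by decide
  have hz1 : pvOktaOf "SKC" = 0 := by decide
  have hz2 : pvOktaOf "CLR" = 0 := by decide
  have hz3 : pvOktaOf "NCD" = 0 := by decide
  have hz4 : pvOktaOf "NSC" = 0 := by decide
  show pvOuterA ts ("OVC" :: "VV" :: "BKN" :: "SCT" :: "FEW" :: "SKC" :: "CLR" :: "NCD" :: "NSC" :: []) = _
  rw [pvOuterA_cons, pvOuterA_cons, pvOuterA_cons, pvOuterA_cons, pvOuterA_cons,
      pvOuterA_cons, pvOuterA_cons, pvOuterA_cons, pvOuterA_cons,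
      h8a, h8b, h6, h3, h1, hz1, hz2, hz3, hz4]
  unfold pvChain pvOuterA
  split_ifs <;> rfl

theorem pvTokenOkta_nonneg (t : String) : 0 ≤ pvTokenOkta t := by
  rw [pvTokenOkta_eq]; exact pvChain_nonneg _ _ _ _ _

-- B's fold computes `max b (chain of the anys)` for a nonnegative accumulator
theorem pvFold_eq (ts : List String) (b : Int) (hb : 0 ≤ b) :
    ts.foldl (fun best t => let okta := pvTokenOkta t; if okta > best then okta else best) b
      = max b (pvChain (ts.any (fun u => PySem.Str.startswith u "OVC"))
                       (ts.any (fun u => PySem.Str.startswith u "VV"))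
                       (ts.any (fun u => PySem.Str.startswith u "BKN"))
                       (ts.any (fun u => PySem.Str.startswith u "SCT"))
                       (ts.any (fun u => PySem.Str.startswith u "FEW"))) := by
  induction ts generalizing b with
  | nil =>
    simp only [List.foldl_nil, List.any_nil]
    norm_num [pvChain]
    omega
  | cons t ts ih =>
    have hto := pvTokenOkta_nonneg t
    have hstep : (0:Int) ≤ if pvTokenOkta t > b then pvTokenOkta t else b := by
      split_ifs <;> omega
    rw [List.foldl_cons, ih _ hstep]
    simp only [List.any_cons]
    rw [pvChain_or]
    rw [pvTokenOkta_eq]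
    have hnn := pvChain_nonneg (PySem.Str.startswith t "OVC") (PySem.Str.startswith t "VV")
      (PySem.Str.startswith t "BKN") (PySem.Str.startswith t "SCT") (PySem.Str.startswith t "FEW")
    have hnn2 := pvChain_nonneg (ts.any (fun u => PySem.Str.startswith u "OVC"))
      (ts.any (fun u => PySem.Str.startswith u "VV"))
      (ts.any (fun u => PySem.Str.startswith u "BKN"))
      (ts.any (fun u => PySem.Str.startswith u "SCT"))
      (ts.any (fun u => PySem.Str.startswith u "FEW"))
    split_ifs <;> omega

-- ===== VERDICT (by name: the statement is the Claim_ definition above) =====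
theorem parse_sky_oktas_py_spec : Claim_equal_parse_sky_oktas_py := by
  intro raw_sky _
  unfold Spec_parse_sky_oktas_py parse_sky_oktas_py parse_sky_oktas_py_alt
  match raw_sky with
  | none => rfl
  | some s =>
    by_cases h : s = ""
    · simp [h]
    · simp only [if_neg h]
      rw [pvFold_eq _ _ le_rfl, pvOuterA_chain]
      have := pvChain_nonneg ((PySem.Str.split₀ (PySem.Str.upper s)).any (fun u => PySem.Str.startswith u "OVC"))
        ((PySem.Str.split₀ (PySem.Str.upper s)).any (fun u => PySem.Str.startswith u "VV"))
        ((PySem.Str.split₀ (PySem.Str.upper s)).any (fun u => PySem.Str.startswith u "BKN"))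
        ((PySem.Str.split₀ (PySem.Str.upper s)).any (fun u => PySem.Str.startswith u "SCT"))
        ((PySem.Str.split₀ (PySem.Str.upper s)).any (fun u => PySem.Str.startswith u "FEW"))
      omega
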